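-- pv_equiv track=rewrite | github.com/BerkIGuler/WirelessDataGenerator | list_available_scenarios.py | categorize_scenarios
-- ===== SOURCE A (Python) =====
-- def categorize_scenarios(scenarios):
--     """
--     Categorize scenarios by type and characteristics.
--
--     Args:
--         scenarios (list): List of scenario names
--
--     Returns:
--         dict: Categorized scenarios
--     """
--     categories = {
--         'city_scenarios': [],
--         'lwm_training': [],
--         'other_scenarios': []
--     }
--
--     for scenario in scenarios:
--         if 'city' in scenario.lower():
--             if scenario.endswith('lwm'):
--                 categories['lwm_training'].append(scenario)
--             else:
--                 categories['city_scenarios'].append(scenario)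
--         else:
--             categories['other_scenarios'].append(scenario)
--
--     # Sort each category
--     for category in categories:
--         categories[category].sort()
--
--     return categories
-- ===== SOURCE B (Python) =====
-- def categorize_scenarios(scenarios):
--     """Map each name to its category via a key function, then build the result
--     as three independent sorted selections (one filtered pass per category)."""
--     def category(name):
--         if 'city' not in name.lower():
--             return 'other_scenarios'
--         return 'lwm_training' if name.endswith('lwm') else 'city_scenarios'
--     return {cat: sorted(s for s in scenarios if category(s) == cat)
--             for cat in ('city_scenarios', 'lwm_training', 'other_scenarios')}
-- ===== Notes on version B (the rewrite author's own statement) =====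
-- stated objective: alternative
-- what changed: B replaces A's single partitioning loop plus per-bucket sort with a category key function and a dict comprehension that makes three independent filtered-and-sorted passes, one per category.
import Mathlib
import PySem

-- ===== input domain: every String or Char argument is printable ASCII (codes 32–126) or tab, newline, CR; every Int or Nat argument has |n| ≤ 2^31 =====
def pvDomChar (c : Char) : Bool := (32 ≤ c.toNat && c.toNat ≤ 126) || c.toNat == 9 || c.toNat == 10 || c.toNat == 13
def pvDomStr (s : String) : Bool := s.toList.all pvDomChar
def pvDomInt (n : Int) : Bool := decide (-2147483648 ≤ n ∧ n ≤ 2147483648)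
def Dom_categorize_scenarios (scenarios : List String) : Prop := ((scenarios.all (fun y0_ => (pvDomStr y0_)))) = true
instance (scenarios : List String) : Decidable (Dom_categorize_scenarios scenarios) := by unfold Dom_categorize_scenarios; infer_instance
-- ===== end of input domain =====

-- B replaces A's single partitioning loop plus per-bucket sort with a category key
-- function and three independent filtered-and-sorted passes, one per category;
-- objective: alternative decomposition, same asymptotic cost.

-- ===== PORT A =====
-- 'city' in scenario.lower()
def pvIsCity (s : String) : Bool := PySem.Str.isIn "city" (PySem.Str.lower s)
-- scenario.endswith('lwm')
def pvIsLwm (s : String) : Bool := PySem.Str.endswith s "lwm"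

def categorize_scenarios (scenarios : List String) : List (String × List String) :=
  -- categories = {'city_scenarios': [], 'lwm_training': [], 'other_scenarios': []}
  let categories : PySem.Dict String (List String) :=
    ((PySem.Dict.empty.insert "city_scenarios" []).insert "lwm_training" []).insert "other_scenarios" []
  -- for scenario in scenarios: …append…
  let categories := scenarios.foldl (fun d scenario =>
    if pvIsCity scenario then
      if pvIsLwm scenario then d.modify "lwm_training" [] (· ++ [scenario])
      else d.modify "city_scenarios" [] (· ++ [scenario])
    else d.modify "other_scenarios" [] (· ++ [scenario])) categories
  -- for category in categories: categories[category].sort()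
  let categories := categories.keys.foldl
    (fun d k => d.modify k [] (fun l => PySem.List.sorted l (fun x => x) false)) categories
  categories.items

-- ===== PORT B =====
-- def category(name): …
def pvCategory (name : String) : String :=
  if !(PySem.Str.isIn "city" (PySem.Str.lower name)) then "other_scenarios"
  else if PySem.Str.endswith name "lwm" then "lwm_training" else "city_scenarios"

def categorize_scenarios_alt (scenarios : List String) : List (String × List String) :=
  -- {cat: sorted(s for s in scenarios if category(s) == cat) for cat in (…)}
  ["city_scenarios", "lwm_training", "other_scenarios"].map
    (fun cat => (cat, PySem.List.sorted (scenarios.filter (fun s => pvCategory s == cat)) (fun x => x) false))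

-- ===== PRECONDITION & SPEC =====
def Spec_categorize_scenarios (scenarios : List String) (out : List (String × List String)) : Prop := out = categorize_scenarios_alt scenarios
instance (scenarios : List String) (out : List (String × List String)) : Decidable (Spec_categorize_scenarios scenarios out) := by unfold Spec_categorize_scenarios; infer_instance

-- ===== CLAIM (what is proved, stated in full; the proofs are below) =====
def Claim_equal_categorize_scenarios : Prop := ∀ (scenarios : List String), Dom_categorize_scenarios scenarios → Spec_categorize_scenarios scenarios (categorize_scenarios scenarios)

-- ===== LEMMAS AND PROOFS =====

-- one modify step on the literal three-key dict, per key
theorem pv_mod_city (c l o : List String) (x : String) :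
    (PySem.Dict.mk [("city_scenarios", c), ("lwm_training", l), ("other_scenarios", o)]).modify
      "city_scenarios" [] (· ++ [x])
    = PySem.Dict.mk [("city_scenarios", c ++ [x]), ("lwm_training", l), ("other_scenarios", o)] := by
  simp [PySem.Dict.modify, PySem.Dict.insert, PySem.Dict.getD, PySem.Dict.get?, PySem.Dict.contains]

theorem pv_mod_lwm (c l o : List String) (x : String) :
    (PySem.Dict.mk [("city_scenarios", c), ("lwm_training", l), ("other_scenarios", o)]).modify
      "lwm_training" [] (· ++ [x])
    = PySem.Dict.mk [("city_scenarios", c), ("lwm_training", l ++ [x]), ("other_scenarios", o)] := by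
  simp [PySem.Dict.modify, PySem.Dict.insert, PySem.Dict.getD, PySem.Dict.get?, PySem.Dict.contains]

theorem pv_mod_other (c l o : List String) (x : String) :
    (PySem.Dict.mk [("city_scenarios", c), ("lwm_training", l), ("other_scenarios", o)]).modify
      "other_scenarios" [] (· ++ [x])
    = PySem.Dict.mk [("city_scenarios", c), ("lwm_training", l), ("other_scenarios", o ++ [x])] := by
  simp [PySem.Dict.modify, PySem.Dict.insert, PySem.Dict.getD, PySem.Dict.get?, PySem.Dict.contains]

-- A's dict loop keeps the three fixed keys and appends into the right value.
theorem pv_dict_fold (xs : List String) (c l o : List String) :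
    xs.foldl
      (fun (d : PySem.Dict String (List String)) scenario =>
        if pvIsCity scenario then
          if pvIsLwm scenario then d.modify "lwm_training" [] (· ++ [scenario])
          else d.modify "city_scenarios" [] (· ++ [scenario])
        else d.modify "other_scenarios" [] (· ++ [scenario]))
      (PySem.Dict.mk [("city_scenarios", c), ("lwm_training", l), ("other_scenarios", o)])
    = PySem.Dict.mk [("city_scenarios", c ++ xs.filter (fun s => pvIsCity s && !pvIsLwm s)),
                     ("lwm_training", l ++ xs.filter (fun s => pvIsCity s && pvIsLwm s)),
                     ("other_scenarios", o ++ xs.filter (fun s => !pvIsCity s))] := by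
  induction xs generalizing c l o with
  | nil => simp
  | cons x xs ih =>
    rw [List.foldl_cons]
    by_cases hc : pvIsCity x = true
    · by_cases hl : pvIsLwm x = true
      · rw [if_pos hc, if_pos hl, pv_mod_lwm, ih]; simp [hc, hl]
      · rw [if_pos hc, if_neg hl, pv_mod_city, ih]; simp [hc, hl]
    · rw [if_neg hc, pv_mod_other, ih]; simp [hc]

-- B's key-equality filters are A's boolean filters, pointwise.
theorem pv_cat_city (s : String) :
    (pvCategory s == "city_scenarios") = (pvIsCity s && !pvIsLwm s) := by
  unfold pvCategory pvIsCity pvIsLwm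
  by_cases hc : PySem.Chars.isIn ['c', 'i', 't', 'y'] (PySem.Chars.lower s.toList) = true <;>
    by_cases hl : PySem.Chars.endswith s.toList ['l', 'w', 'm'] = true <;>
      simp [PySem.Str.isIn, PySem.Str.lower, PySem.Str.endswith, hc, hl]

theorem pv_cat_lwm (s : String) :
    (pvCategory s == "lwm_training") = (pvIsCity s && pvIsLwm s) := by
  unfold pvCategory pvIsCity pvIsLwm
  by_cases hc : PySem.Chars.isIn ['c', 'i', 't', 'y'] (PySem.Chars.lower s.toList) = true <;>
    by_cases hl : PySem.Chars.endswith s.toList ['l', 'w', 'm'] = true <;>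
      simp [PySem.Str.isIn, PySem.Str.lower, PySem.Str.endswith, hc, hl]

theorem pv_cat_other (s : String) :
    (pvCategory s == "other_scenarios") = (!pvIsCity s) := by
  unfold pvCategory pvIsCity
  by_cases hc : PySem.Chars.isIn ['c', 'i', 't', 'y'] (PySem.Chars.lower s.toList) = true <;>
    by_cases hl : PySem.Chars.endswith s.toList ['l', 'w', 'm'] = true <;>
      simp [PySem.Str.isIn, PySem.Str.lower, PySem.Str.endswith, hc, hl]

-- ===== VERDICT (by name: the statement is the Claim_ definition above) =====
theorem categorize_scenarios_spec : Claim_equal_categorize_scenarios := by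
  intro scenarios _
  show categorize_scenarios scenarios = categorize_scenarios_alt scenarios
  have hA : categorize_scenarios scenarios
      = ((scenarios.foldl (fun d scenario =>
            if pvIsCity scenario then
              if pvIsLwm scenario then d.modify "lwm_training" [] (· ++ [scenario])
              else d.modify "city_scenarios" [] (· ++ [scenario])
            else d.modify "other_scenarios" [] (· ++ [scenario]))
          (PySem.Dict.mk [("city_scenarios", []), ("lwm_training", []), ("other_scenarios", [])])).keys.foldl
            (fun d k => d.modify k [] (fun l => PySem.List.sorted l (fun x => x) false))
            (scenarios.foldl (fun d scenario =>
              if pvIsCity scenario then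
                if pvIsLwm scenario then d.modify "lwm_training" [] (· ++ [scenario])
                else d.modify "city_scenarios" [] (· ++ [scenario])
              else d.modify "other_scenarios" [] (· ++ [scenario]))
            (PySem.Dict.mk [("city_scenarios", []), ("lwm_training", []), ("other_scenarios", [])]))).items := rfl
  rw [hA, pv_dict_fold]
  simp only [List.nil_append]
  show _ = List.map _ ["city_scenarios", "lwm_training", "other_scenarios"]
  simp only [List.map, pv_cat_city, pv_cat_lwm, pv_cat_other]
  simp [PySem.Dict.keys, PySem.Dict.items, PySem.Dict.modify, PySem.Dict.insert,
        PySem.Dict.getD, PySem.Dict.get?, PySem.Dict.contains]
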